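-- pv_equiv track=rewrite | github.com/Cosme-jr/atividade_pratica7 | questao1.py | infer_time_column
-- ===== SOURCE A (Python) =====
-- def infer_time_column(cols):
--     """Detecta a coluna de tempo por nomes comuns."""
--     candidates = [
--         "tempo_execucao_ms", "tempo_execucao_s",
--         "duration_ms", "duration_s",
--         "tempo", "time"
--     ]
--     cols_lower = {c.lower(): c for c in cols}
--     for c in candidates:
--         if c in cols_lower:
--             return cols_lower[c]
--     return None
-- ===== SOURCE B (Python) =====
-- def infer_time_column(cols):
--     """Detecta a coluna de tempo por nomes comuns."""
--     candidates = [
--         "tempo_execucao_ms", "tempo_execucao_s",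
--         "duration_ms", "duration_s",
--         "tempo", "time"
--     ]
--     best_rank = len(candidates)
--     best = None
--     for c in cols:
--         lc = c.lower()
--         if lc in candidates:
--             r = candidates.index(lc)
--             if r <= best_rank:
--                 best_rank, best = r, c
--     return best
-- ===== Notes on version B (the rewrite author's own statement) =====
-- stated objective: alternative
-- what changed: Single pass over the columns with an argmin accumulator: each column is ranked by its candidate-priority index and the pass keeps the last column achieving the minimal rank, instead of building a lowercase->original dict and probing it candidate by candidate.
import Mathlib
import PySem

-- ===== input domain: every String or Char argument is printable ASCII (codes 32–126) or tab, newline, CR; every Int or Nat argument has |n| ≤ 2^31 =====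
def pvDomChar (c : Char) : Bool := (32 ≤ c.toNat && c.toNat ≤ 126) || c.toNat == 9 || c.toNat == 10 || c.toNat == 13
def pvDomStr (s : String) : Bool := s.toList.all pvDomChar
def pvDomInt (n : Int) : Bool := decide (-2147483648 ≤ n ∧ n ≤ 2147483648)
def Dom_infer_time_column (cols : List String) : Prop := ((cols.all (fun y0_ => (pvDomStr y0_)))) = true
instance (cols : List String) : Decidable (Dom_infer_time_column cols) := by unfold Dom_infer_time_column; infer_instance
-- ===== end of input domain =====

-- B replaces A's dict build + candidate-by-candidate probes with ONE pass over the
-- columns keeping an argmin accumulator (minimal candidate rank, last match wins);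
-- objective: alternative.

-- ===== PORT A =====
def pvCandidates : List String :=
  ["tempo_execucao_ms", "tempo_execucao_s", "duration_ms", "duration_s", "tempo", "time"]

-- the dict comprehension {c.lower(): c for c in cols}
def pvColsLower (cols : List String) : PySem.Dict String String :=
  cols.foldl (fun d c => d.insert (PySem.Str.lower c) c) PySem.Dict.empty

-- the 'for c in candidates' loop; returning 'd.get? c' is Python's 'return cols_lower[c]'
def pvALoop (d : PySem.Dict String String) : List String → Option String
  | [] => none
  | c :: rest => if d.contains c then d.get? c else pvALoop d rest

def infer_time_column (cols : List String) : Option String :=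
  pvALoop (pvColsLower cols) pvCandidates

-- ===== PORT B =====
-- loop body of Source B: lc = c.lower(); if lc in candidates: r = candidates.index(lc);
--                    if r <= best_rank: best_rank, best = r, c
def pvBStep (st : Nat × Option String) (c : String) : Nat × Option String :=
  let lc := PySem.Str.lower c
  if lc ∈ pvCandidates then
    match PySem.List.index? pvCandidates lc with
    | some r => if r ≤ st.1 then (r, some c) else st
    | none => st
  else st

-- best_rank = len(candidates) = 6, best = None; return best
def infer_time_column_alt (cols : List String) : Option String :=
  (cols.foldl pvBStep (pvCandidates.length, none)).2

-- ===== PRECONDITION & SPEC =====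
def Spec_infer_time_column (cols : List String) (out : Option String) : Prop := out = infer_time_column_alt cols
instance (cols : List String) (out : Option String) : Decidable (Spec_infer_time_column cols out) := by unfold Spec_infer_time_column; infer_instance

-- ===== CLAIM (what is proved, stated in full; the proofs are below) =====
def Claim_equal_infer_time_column : Prop := ∀ (cols : List String), Dom_infer_time_column cols → Spec_infer_time_column cols (infer_time_column cols)

-- ===== LEMMAS AND PROOFS =====

-- Invariant tying the dict A has built so far to B's accumulator:
-- every candidate of rank below the current best rank is absent from the dict, and
-- if a best column is recorded, the candidate at exactly that rank maps to it.
def pvInv (d : PySem.Dict String String) (st : Nat × Option String) : Prop :=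
  (∀ cand r, PySem.List.index? pvCandidates cand = some r → r < st.1 → d.get? cand = none)
  ∧ (match st.2 with
     | none => st.1 = pvCandidates.length
     | some h => ∃ cand, PySem.List.index? pvCandidates cand = some st.1 ∧ d.get? cand = some h)

theorem pvRank_inj {a b : String} {r : Nat}
    (ha : PySem.List.index? pvCandidates a = some r)
    (hb : PySem.List.index? pvCandidates b = some r) : a = b := by
  obtain ⟨hk, hak, _⟩ := PySem.List.getElem_of_index?_eq_some ha
  obtain ⟨hk', hbk, _⟩ := PySem.List.getElem_of_index?_eq_some hb
  rw [← hak, ← hbk]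

theorem pvRank_lt {a : String} {r : Nat}
    (ha : PySem.List.index? pvCandidates a = some r) : r < pvCandidates.length :=
  (PySem.List.getElem_of_index?_eq_some ha).1

theorem pvInv_step (d : PySem.Dict String String) (st : Nat × Option String) (c : String)
    (h : pvInv d st) : pvInv (d.insert (PySem.Str.lower c) c) (pvBStep st c) := by
  obtain ⟨h1, h2⟩ := h
  unfold pvBStep
  by_cases hmem : PySem.Str.lower c ∈ pvCandidates
  · simp only [hmem, if_true]
    obtain ⟨r, hr⟩ := Option.isSome_iff_exists.mp ((PySem.List.index?_isSome_iff _ _).mpr hmem)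
    rw [hr]
    by_cases hle : r ≤ st.1
    · simp only [hle, if_true]
      constructor
      · intro cand r' hcand hlt
        have hne : cand ≠ PySem.Str.lower c := by
          intro he; subst he; rw [hcand] at hr; injection hr with h'; omega
        rw [PySem.Dict.get?_insert_of_ne _ _ hne]
        exact h1 cand r' hcand (lt_of_lt_of_le hlt hle)
      · exact ⟨PySem.Str.lower c, hr, PySem.Dict.get?_insert_self d _ c⟩
    · simp only [hle, if_false]
      have hgt : st.1 < r := by omega
      constructor
      · intro cand r' hcand hlt
        have hne : cand ≠ PySem.Str.lower c := by
          intro he; subst he; rw [hcand] at hr; injection hr with h'; omega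
        rw [PySem.Dict.get?_insert_of_ne _ _ hne]
        exact h1 cand r' hcand hlt
      · cases hst : st.2 with
        | none => simpa [hst] using h2
        | some h' =>
          rw [hst] at h2
          obtain ⟨cand, hcand, hget⟩ := h2
          refine ⟨cand, hcand, ?_⟩
          have hne : cand ≠ PySem.Str.lower c := by
            intro he; subst he; rw [hcand] at hr; injection hr with h''; omega
          rw [PySem.Dict.get?_insert_of_ne _ _ hne]; exact hget
  · simp only [hmem, if_false]
    constructor
    · intro cand r' hcand hlt
      have hne : cand ≠ PySem.Str.lower c := by
        intro he; subst he
        exact hmem ((PySem.List.index?_isSome_iff _ _).mp (by rw [hcand]; rfl))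
      rw [PySem.Dict.get?_insert_of_ne _ _ hne]
      exact h1 cand r' hcand hlt
    · cases hst : st.2 with
      | none => simpa [hst] using h2
      | some h' =>
        rw [hst] at h2
        obtain ⟨cand, hcand, hget⟩ := h2
        refine ⟨cand, hcand, ?_⟩
        have hne : cand ≠ PySem.Str.lower c := by
          intro he; subst he
          exact hmem ((PySem.List.index?_isSome_iff _ _).mp (by rw [hcand]; rfl))
        rw [PySem.Dict.get?_insert_of_ne _ _ hne]; exact hget

theorem pvInv_foldl (cols : List String) (d : PySem.Dict String String)
    (st : Nat × Option String) (h : pvInv d st) :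
    pvInv (cols.foldl (fun d c => d.insert (PySem.Str.lower c) c) d) (cols.foldl pvBStep st) := by
  induction cols generalizing d st with
  | nil => exact h
  | cons c rest ih => exact ih _ _ (pvInv_step d st c h)

-- candidate ranks are the literal positions
theorem pvRank_concrete :
    PySem.List.index? pvCandidates "tempo_execucao_ms" = some 0 ∧
    PySem.List.index? pvCandidates "tempo_execucao_s" = some 1 ∧
    PySem.List.index? pvCandidates "duration_ms" = some 2 ∧
    PySem.List.index? pvCandidates "duration_s" = some 3 ∧
    PySem.List.index? pvCandidates "tempo" = some 4 ∧
    PySem.List.index? pvCandidates "time" = some 5 := by decide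

theorem pvALoop_of_inv (d : PySem.Dict String String) (st : Nat × Option String)
    (h : pvInv d st) : pvALoop d pvCandidates = st.2 := by
  obtain ⟨h1, h2⟩ := h
  obtain ⟨c0, c1, c2, c3, c4, c5⟩ := pvRank_concrete
  cases hst : st.2 with
  | none =>
    rw [hst] at h2
    have hlen : st.1 = 6 := h2
    have n0 := h1 _ _ c0 (by omega); have n1 := h1 _ _ c1 (by omega)
    have n2 := h1 _ _ c2 (by omega); have n3 := h1 _ _ c3 (by omega)
    have n4 := h1 _ _ c4 (by omega); have n5 := h1 _ _ c5 (by omega)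
    simp [pvALoop, pvCandidates, PySem.Dict.contains_eq_isSome_get?, n0, n1, n2, n3, n4, n5]
  | some hcol =>
    rw [hst] at h2
    obtain ⟨cand, hcand, hget⟩ := h2
    have hb := pvRank_lt hcand
    simp only [pvCandidates, List.length_cons, List.length_nil] at hb
    interval_cases hq : st.1 <;>
      [ (have : cand = "tempo_execucao_ms" := pvRank_inj hcand c0);
        (have : cand = "tempo_execucao_s" := pvRank_inj hcand c1);
        (have : cand = "duration_ms" := pvRank_inj hcand c2);
        (have : cand = "duration_s" := pvRank_inj hcand c3);
        (have : cand = "tempo" := pvRank_inj hcand c4);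
        (have : cand = "time" := pvRank_inj hcand c5) ] <;>
      subst this <;>
      simp [pvALoop, pvCandidates, PySem.Dict.contains_eq_isSome_get?, hget,
        h1 _ _ c0, h1 _ _ c1, h1 _ _ c2, h1 _ _ c3, h1 _ _ c4]

-- ===== VERDICT (by name: the statement is the Claim_ definition above) =====
theorem infer_time_column_spec : Claim_equal_infer_time_column := by
  intro cols _
  show infer_time_column cols = infer_time_column_alt cols
  unfold infer_time_column infer_time_column_alt pvColsLower
  refine pvALoop_of_inv _ _ (pvInv_foldl cols PySem.Dict.empty (pvCandidates.length, none) ?_)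
  constructor
  · intro cand r _ _; exact PySem.Dict.get?_empty cand
  · rfl
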